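-- pv_equiv track=rewrite | github.com/jmussamuhindo/GameTheory_Project | pg.py | calculate_odd_nim
-- ===== SOURCE A (Python) =====
-- def mex(s):
--     """Calculate the Minimum EXcludant of a set of numbers."""
--     m = 0
--     while m in s:
--         m += 1
--     return m
--
-- def calculate_odd_nim(n):
--     """Calculate the nimbers for Odd-Nim up to size n."""
--     odd_nim = [0] * (n + 1)  # Initialize the nimber list with zeroes
--     for i in range(1, n + 1):
--         reachable = set()
--         # Iterate over possible odd moves
--         for move in range(1, i + 1, 2):
--             if i - move >= 0:
--                 reachable.add(odd_nim[i - move])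
--         odd_nim[i] = mex(reachable)
--     return odd_nim
-- ===== SOURCE B (Python) =====
-- def calculate_odd_nim(n):
--     """Calculate the nimbers for Odd-Nim up to size n."""
--     # Closed form: from position i the odd moves all leave a position of
--     # parity (i-1) % 2, so the reachable nimber set is {(i-1) % 2} and the
--     # mex alternates: nimber(i) = i % 2.
--     return [i % 2 for i in range(n + 1)]
-- ===== Notes on version B (the rewrite author's own statement) =====
-- stated objective: faster
-- what changed: Replaces the O(n^2) mex-over-reachable-set dynamic programming with the closed form nimber(i) = i % 2, computed in one pass.
import Mathlib
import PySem

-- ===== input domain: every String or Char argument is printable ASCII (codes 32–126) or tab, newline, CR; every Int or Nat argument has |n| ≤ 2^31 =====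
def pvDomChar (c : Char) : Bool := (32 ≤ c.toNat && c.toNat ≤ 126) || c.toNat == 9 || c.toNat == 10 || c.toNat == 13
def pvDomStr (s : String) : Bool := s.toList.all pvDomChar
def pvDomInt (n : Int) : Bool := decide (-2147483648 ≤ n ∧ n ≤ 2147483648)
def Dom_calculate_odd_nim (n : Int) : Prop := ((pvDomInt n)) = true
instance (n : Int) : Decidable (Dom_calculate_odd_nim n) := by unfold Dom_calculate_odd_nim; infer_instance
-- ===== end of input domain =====

-- B replaces A's quadratic mex-over-reachable-sets DP with the closed form nimber(i) = i % 2.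

-- ===== PORT A =====
-- mex: 'while m in s: m += 1'; fuel s.length + 1 always suffices (the loop can advance
-- at most once per distinct element of s).
def pvMexLoop : Nat → Int → PySem.Set Int → Int
  | 0, m, _ => m
  | fuel + 1, m, s => if PySem.Set.contains s m then pvMexLoop fuel (m + 1) s else m

def pvMex (s : PySem.Set Int) : Int := pvMexLoop (s.length + 1) 0 s

-- one iteration of A's outer 'for i in range(1, n+1)' loop; the Python list odd_nim is
-- carried as an Array (constant-time index/assign, like a Python list); the index
-- i - move is guarded nonnegative and i is in range, so getD / .toNat / set! are exact
def pvStep (odd_nim : Array Int) (i : Int) : Array Int :=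
  let reachable := (PySem.List.pyRange 1 (i + 1) 2).foldl
      (fun r move =>
        if i - move ≥ 0 then PySem.Set.add r (odd_nim.getD (i - move).toNat 0) else r)
      PySem.Set.empty
  odd_nim.set! i.toNat (pvMex reachable)

def calculate_odd_nim (n : Int) : List Int :=
  let odd_nim := (PySem.List.pyRepeat [(0 : Int)] (n + 1)).toArray
  ((PySem.List.pyRange 1 (n + 1) 1).foldl pvStep odd_nim).toList

-- ===== PORT B =====
def calculate_odd_nim_alt (n : Int) : List Int :=
  (PySem.List.pyRange 0 (n + 1) 1).map (fun i => PySem.Int.mod i 2)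

-- ===== PRECONDITION & SPEC =====
def Spec_calculate_odd_nim (n : Int) (out : List Int) : Prop := out = calculate_odd_nim_alt n
instance (n : Int) (out : List Int) : Decidable (Spec_calculate_odd_nim n out) := by unfold Spec_calculate_odd_nim; infer_instance

-- ===== CLAIM (what is proved, stated in full; the proofs are below) =====
def Claim_equal_calculate_odd_nim : Prop := ∀ (n : Int), Dom_calculate_odd_nim n → Spec_calculate_odd_nim n (calculate_odd_nim n)

-- ===== LEMMAS AND PROOFS =====

-- list-level mirror of pvStep, used only to state and prove the loop invariant
def pvStepL (odd_nim : List Int) (i : Int) : List Int :=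
  let reachable := (PySem.List.pyRange 1 (i + 1) 2).foldl
      (fun r move =>
        if i - move ≥ 0 then PySem.Set.add r (PySem.List.pyGetD odd_nim (i - move) 0) else r)
      PySem.Set.empty
  PySem.List.pySetD odd_nim i (pvMex reachable)

theorem pv_step_toList (arr : Array Int) (i : Int) (h0 : 0 ≤ i) :
    (pvStep arr i).toList = pvStepL arr.toList i := by
  unfold pvStep pvStepL
  have hfold : (PySem.List.pyRange 1 (i + 1) 2).foldl
      (fun r move => if i - move ≥ 0 then PySem.Set.add r (arr.getD (i - move).toNat 0) else r)
      PySem.Set.empty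
      = (PySem.List.pyRange 1 (i + 1) 2).foldl
      (fun r move => if i - move ≥ 0 then PySem.Set.add r (PySem.List.pyGetD arr.toList (i - move) 0) else r)
      PySem.Set.empty := by
    have hgen : ∀ (ms : List Int) (s : PySem.Set Int),
        ms.foldl (fun r move => if i - move ≥ 0 then PySem.Set.add r (arr.getD (i - move).toNat 0) else r) s
          = ms.foldl (fun r move => if i - move ≥ 0 then PySem.Set.add r (PySem.List.pyGetD arr.toList (i - move) 0) else r) s := by
      intro ms
      induction ms with
      | nil => intro _; rfl
      | cons m rest ih =>
        intro s
        rw [List.foldl_cons, List.foldl_cons]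
        by_cases h : i - m ≥ 0
        · rw [if_pos h, if_pos h]
          rw [PySem.List.pyGetD_of_nonneg _ _ h]
          rw [show arr.getD (i - m).toNat 0 = arr.toList.getD (i - m).toNat 0 from by
            simp [Array.getD_eq_getD_getElem?, List.getD_eq_getElem?_getD, Array.getElem?_toList]]
          exact ih _
        · rw [if_neg h, if_neg h]
          exact ih _
    exact hgen _ _
  show (arr.set! i.toNat (pvMex _)).toList = PySem.List.pySetD arr.toList i (pvMex _)
  rw [hfold, PySem.List.pySetD_of_nonneg _ _ h0]
  simp [Array.set!]

theorem pv_fold_toList : ∀ (l : List Int), (∀ i ∈ l, 0 ≤ i) → ∀ (arr : Array Int),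
    (l.foldl pvStep arr).toList = l.foldl pvStepL arr.toList := by
  intro l
  induction l with
  | nil => intro _ arr; rfl
  | cons i rest ih =>
    intro h arr
    rw [List.foldl_cons, List.foldl_cons, ih (fun x hx => h x (by simp [hx]))]
    rw [pv_step_toList arr i (h i (by simp))]

-- A's loop, as a list computation
theorem pv_calc_eq_list (n : Int) :
    calculate_odd_nim n
      = (PySem.List.pyRange 1 (n + 1) 1).foldl pvStepL (PySem.List.pyRepeat [(0 : Int)] (n + 1)) := by
  unfold calculate_odd_nim
  rw [pv_fold_toList _ (fun i hi => by
    rw [PySem.List.mem_pyRange_one] at hi; omega)]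

-- the state of A's outer loop after processing i = 1 .. k
def pvL (n : Int) (k : Nat) : List Int :=
  (PySem.List.pyRange 1 ((k : Int) + 1) 1).foldl pvStepL (PySem.List.pyRepeat [(0 : Int)] (n + 1))

theorem pvL_succ (n : Int) (k : Nat) : pvL n (k + 1) = pvStepL (pvL n k) ((k : Int) + 1) := by
  unfold pvL
  rw [show ((k + 1 : Nat) : Int) + 1 = ((k : Int) + 1) + 1 from by push_cast; ring]
  rw [PySem.List.pyRange_one_succ_right (by omega : (1 : Int) ≤ (k : Int) + 1)]
  rw [List.foldl_append, List.foldl_cons, List.foldl_nil]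

-- adding an element already present leaves the set unchanged
theorem pv_foldl_add_mem (v : Int) (c : Int → Prop) [DecidablePred c] (val : Int → Int) :
    ∀ (ms : List Int) (s : PySem.Set Int), (∀ m ∈ ms, c m ∧ val m = v) → v ∈ s →
      ms.foldl (fun r m => if c m then PySem.Set.add r (val m) else r) s = s := by
  intro ms
  induction ms with
  | nil => intro s _ _; rfl
  | cons m rest ih =>
    intro s h hv
    have hm := h m (by simp)
    have hrest : ∀ x ∈ rest, c x ∧ val x = v := fun x hx => h x (by simp [hx])
    rw [List.foldl_cons, if_pos hm.1, hm.2]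
    have hadd : PySem.Set.add s v = s := by
      simp only [PySem.Set.add, if_pos ((PySem.Set.contains_iff s v).mpr hv)]
    rw [hadd]
    exact ih s hrest hv

-- a nonempty fold of adds of the constant v starting from the empty set yields {v}
theorem pv_foldl_add_const (v : Int) (c : Int → Prop) [DecidablePred c] (val : Int → Int)
    (ms : List Int) (hne : ms ≠ []) (h : ∀ m ∈ ms, c m ∧ val m = v) :
    ms.foldl (fun r m => if c m then PySem.Set.add r (val m) else r) PySem.Set.empty = [v] := by
  cases ms with
  | nil => exact absurd rfl hne
  | cons m rest =>
    have hm := h m (by simp)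
    have hrest : ∀ x ∈ rest, c x ∧ val x = v := fun x hx => h x (by simp [hx])
    rw [List.foldl_cons, if_pos hm.1, hm.2]
    have hadd : PySem.Set.add PySem.Set.empty v = [v] := by
      simp [PySem.Set.add, PySem.Set.empty, PySem.Set.contains]
    rw [hadd]
    exact pv_foldl_add_mem v c val rest [v] hrest (by simp)

theorem pv_mex_singleton (i : Int) :
    pvMex [PySem.Int.mod (i - 1) 2] = PySem.Int.mod i 2 := by
  have h2 : (0:Int) < 2 := by norm_num
  rw [PySem.Int.mod_eq_emod_of_pos h2, PySem.Int.mod_eq_emod_of_pos h2]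
  have hcases : (i - 1) % 2 = 0 ∨ (i - 1) % 2 = 1 := by omega
  rcases hcases with h | h
  · have hI : i % 2 = 1 := by omega
    rw [h, hI]; decide
  · have hI : i % 2 = 0 := by omega
    rw [h, hI]; decide

-- one step of A's loop computes reachable = {(i-1) % 2} and writes mex = i % 2 at index i
theorem pv_step_eq (odd_nim : List Int) (i : Int) (hi : 1 ≤ i)
    (hprev : ∀ j : Int, 0 ≤ j → j < i → PySem.List.pyGetD odd_nim j 0 = PySem.Int.mod j 2) :
    pvStepL odd_nim i = PySem.List.pySetD odd_nim i (PySem.Int.mod i 2) := by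
  unfold pvStepL
  have hne : PySem.List.pyRange 1 (i + 1) 2 ≠ [] := by
    have hmem : (1:Int) ∈ PySem.List.pyRange 1 (i + 1) 2 := by
      rw [PySem.List.mem_pyRange_iff_of_pos (by norm_num)]
      exact ⟨le_refl _, by omega, by norm_num⟩
    intro hnil; rw [hnil] at hmem; simp at hmem
  have hall : ∀ m ∈ PySem.List.pyRange 1 (i + 1) 2,
      (i - m ≥ 0) ∧ PySem.List.pyGetD odd_nim (i - m) 0 = PySem.Int.mod (i - 1) 2 := by
    intro m hm
    rw [PySem.List.mem_pyRange_iff_of_pos (by norm_num)] at hm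
    obtain ⟨h1, h2, k, hk⟩ := hm
    refine ⟨by omega, ?_⟩
    rw [hprev (i - m) (by omega) (by omega)]
    have h2p : (0:Int) < 2 := by norm_num
    rw [PySem.Int.mod_eq_emod_of_pos h2p, PySem.Int.mod_eq_emod_of_pos h2p]
    omega
  rw [pv_foldl_add_const (PySem.Int.mod (i - 1) 2)
      (fun m => i - m ≥ 0) (fun m => PySem.List.pyGetD odd_nim (i - m) 0)
      (PySem.List.pyRange 1 (i + 1) 2) hne hall]
  show PySem.List.pySetD odd_nim i (pvMex [PySem.Int.mod (i - 1) 2])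
      = PySem.List.pySetD odd_nim i (PySem.Int.mod i 2)
  rw [pv_mex_singleton i]

-- loop invariant: after processing 1..k, entry j holds j % 2 for j ≤ k and 0 beyond
theorem pv_loop_inv (n : Int) (hn : 0 ≤ n) : ∀ (k : Nat), (k : Int) ≤ n →
    (pvL n k).length = (n + 1).toNat ∧
    (∀ j : Int, 0 ≤ j → j ≤ n →
      PySem.List.pyGetD (pvL n k) j 0 = if j ≤ (k : Int) then PySem.Int.mod j 2 else 0) := by
  intro k
  induction k with
  | zero =>
    intro _
    have hL0 : pvL n 0 = List.replicate (n + 1).toNat 0 := by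
      unfold pvL
      rw [show ((0 : Nat) : Int) + 1 = 1 from by norm_num]
      rw [PySem.List.pyRange_one_eq_nil (le_refl _)]
      rw [List.foldl_nil, PySem.List.pyRepeat_singleton]
    rw [hL0]
    refine ⟨by simp, ?_⟩
    intro j hj0 hjn
    rw [PySem.List.pyGetD_eq_getElem _ 0 hj0 (by simp; omega)]
    rw [List.getElem_replicate]
    by_cases h : j ≤ ((0 : Nat) : Int)
    · have hj : j = 0 := by omega
      subst hj; simp [PySem.Int.mod]
    · rw [if_neg h]
  | succ k ih =>
    intro hk1
    have hk : (k : Int) ≤ n := by push_cast at hk1 ⊢; omega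
    obtain ⟨hlen, hinv⟩ := ih hk
    have hstep : pvL n (k + 1) = PySem.List.pySetD (pvL n k) ((k : Int) + 1) (PySem.Int.mod ((k : Int) + 1) 2) := by
      rw [pvL_succ]
      apply pv_step_eq (pvL n k) ((k : Int) + 1) (by omega)
      intro j hj0 hji
      rw [hinv j hj0 (by omega), if_pos (by omega : j ≤ (k : Int))]
    rw [hstep, PySem.List.pySetD_of_nonneg _ _ (by omega : (0:Int) ≤ (k : Int) + 1)]
    have hkt : ((k : Int) + 1).toNat = k + 1 := by omega
    refine ⟨by rw [List.length_set, hlen], ?_⟩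
    intro j hj0 hjn
    have hjlt : j.toNat < (pvL n k).length := by rw [hlen]; omega
    rw [PySem.List.pyGetD_eq_getElem _ 0 hj0 (by simp only [List.length_set, hlen]; omega)]
    by_cases hje : j = (k : Int) + 1
    · subst hje
      rw [List.getElem_set_self (by simp only [List.length_set, hlen]; omega)]
      rw [if_pos (by push_cast; omega)]
    · rw [List.getElem_set_ne (by omega)]
      rw [← PySem.List.pyGetD_eq_getElem _ 0 hj0 (by rw [hlen]; omega)]
      rw [hinv j hj0 hjn]
      by_cases h1 : j ≤ (k : Int)
      · rw [if_pos h1, if_pos (by push_cast; omega)]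
      · rw [if_neg h1, if_neg (by push_cast; omega)]

theorem pv_main (n : Int) : calculate_odd_nim n = calculate_odd_nim_alt n := by
  by_cases hn : 0 ≤ n
  · have hA : calculate_odd_nim n = pvL n n.toNat := by
      rw [pv_calc_eq_list]
      unfold pvL
      rw [show ((n.toNat : Int)) + 1 = n + 1 from by omega]
    obtain ⟨hlen, hinv⟩ := pv_loop_inv n hn n.toNat (by omega)
    rw [hA]
    unfold calculate_odd_nim_alt
    apply List.ext_getElem
    · rw [hlen]
      simp [PySem.List.length_pyRange_one]
    · intro i h1 h2
      have hin : (i : Int) ≤ n := by rw [hlen] at h1; omega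
      have hget := hinv (i : Int) (by omega) hin
      rw [if_pos (by omega : (i : Int) ≤ (n.toNat : Int))] at hget
      rw [PySem.List.pyGetD_eq_getElem _ 0 (by omega) (by rw [hlen]; omega)] at hget
      simp only [Int.toNat_natCast] at hget
      rw [hget, List.getElem_map, PySem.List.getElem_pyRange_one]
      norm_num
  · have h1 : n + 1 ≤ 0 := by omega
    unfold calculate_odd_nim calculate_odd_nim_alt
    rw [PySem.List.pyRange_one_eq_nil (by omega), PySem.List.pyRange_one_eq_nil (by omega)]
    simp [PySem.List.pyRepeat_singleton, Int.toNat_of_nonpos h1]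
  -- ports agree on every input

-- ===== VERDICT (by name: the statement is the Claim_ definition above) =====
theorem calculate_odd_nim_spec : Claim_equal_calculate_odd_nim := by
  intro n _
  unfold Spec_calculate_odd_nim
  exact pv_main n
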